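-- pv_equiv track=rewrite | github.com/LilMortal/HackingScriptsCollection | Cryptography & Encoding/Certificate Chain Verifier/cert_chain_verifier.py | _extract_san
-- ===== SOURCE A (Python) =====
-- from typing import List, Dict, Optional, Tuple
--
-- def _extract_san(lines: List[str]) -> List[str]:
--     """Extract Subject Alternative Names from OpenSSL output."""
--     san_list = []
--     in_san_section = False
--
--     for line in lines:
--         if 'X509v3 Subject Alternative Name:' in line:
--             in_san_section = True
--             continue
--
--         if in_san_section:
--             if line.strip().startswith('DNS:') or line.strip().startswith('IP:'):
--                 # Parse SAN entries
--                 entries = line.strip().split(', ')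
--                 for entry in entries:
--                     if ':' in entry:
--                         san_list.append(entry)
--                 break
--
--     return san_list
-- ===== SOURCE B (Python) =====
-- def _extract_san(lines):
--     """Index-materialising version: collect all header / entry positions up front,
--     then index back into the list; no flag, no break, no accumulator."""
--     marker = 'X509v3 Subject Alternative Name:'
--
--     def has_marker(l):
--         return marker in l
--
--     def is_entry(l):
--         return l.strip().startswith(('DNS:', 'IP:'))
--
--     n = len(lines)
--     header_idxs = [i for i in range(n) if has_marker(lines[i])]
--     if not header_idxs:
--         return []
--     entry_idxs = [i for i in range(header_idxs[0] + 1, n)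
--                   if not has_marker(lines[i]) and is_entry(lines[i])]
--     if not entry_idxs:
--         return []
--     s = lines[entry_idxs[0]].strip()
--     return [e for e in s.split(', ') if ':' in e]
-- ===== Notes on version B (the rewrite author's own statement) =====
-- stated objective: alternative
-- what changed: Replaces A's flag-driven loop with break/accumulator by an index-materialising pipeline: two list comprehensions over range(n) collect ALL header positions and ALL entry positions after the first header (no early exit, no mutable state), then the answer is read off by indexing lines at the first entry position.
import Mathlib
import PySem

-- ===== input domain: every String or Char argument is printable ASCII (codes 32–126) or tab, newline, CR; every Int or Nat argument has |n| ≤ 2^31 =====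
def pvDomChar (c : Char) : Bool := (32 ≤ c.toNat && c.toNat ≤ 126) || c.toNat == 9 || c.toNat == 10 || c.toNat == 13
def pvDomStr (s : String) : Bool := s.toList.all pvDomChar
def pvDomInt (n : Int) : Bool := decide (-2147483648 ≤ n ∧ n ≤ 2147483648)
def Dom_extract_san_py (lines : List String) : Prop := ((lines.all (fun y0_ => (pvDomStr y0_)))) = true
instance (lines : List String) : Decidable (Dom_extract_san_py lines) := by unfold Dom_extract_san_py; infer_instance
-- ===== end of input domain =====

-- B replaces A's flag-driven loop (break + accumulator) by an index-materialising pipeline: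
-- collect all header positions and all entry positions via comprehensions over range(n),
-- then index back into the list; an alternative stateless decomposition of the same cost.

-- ===== PORT A =====
-- literal port of A's flag loop: state = (san_list, in_san_section)
def extractSanGoA : List String → List String → Bool → List String
  | [], san, _ => san
  | l :: ls, san, flag =>
    if PySem.Str.isIn "X509v3 Subject Alternative Name:" l then
      extractSanGoA ls san true
    else if flag then
      if PySem.Str.startswith (PySem.Str.strip l) "DNS:" ||
         PySem.Str.startswith (PySem.Str.strip l) "IP:" then
        -- entries = line.strip().split(', '); inner append loop; then break
        (((PySem.Str.split? (PySem.Str.strip l) ", ").getD []).foldl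
          (fun acc e => if PySem.Str.isIn ":" e then acc ++ [e] else acc) san)
      else extractSanGoA ls san flag
    else extractSanGoA ls san flag

def extract_san_py (lines : List String) : List String :=
  extractSanGoA lines [] false

-- ===== PORT B =====
-- Source B's helpers has_marker / is_entry
def pvHasMarker (l : String) : Bool :=
  PySem.Str.isIn "X509v3 Subject Alternative Name:" l

def pvIsEntry (l : String) : Bool :=
  PySem.Str.startswith (PySem.Str.strip l) "DNS:" ||
  PySem.Str.startswith (PySem.Str.strip l) "IP:"

def extract_san_py_alt (lines : List String) : List String :=
  let n : Int := lines.length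
  let headerIdxs : List Int :=
    (PySem.List.pyRange 0 n 1).filter (fun i => pvHasMarker (PySem.List.pyGetD lines i ""))
  match headerIdxs with
  | [] => []
  | h :: _ =>
    let entryIdxs : List Int :=
      (PySem.List.pyRange (h + 1) n 1).filter
        (fun i => !pvHasMarker (PySem.List.pyGetD lines i "") &&
                  pvIsEntry (PySem.List.pyGetD lines i ""))
    match entryIdxs with
    | [] => []
    | j :: _ =>
      ((PySem.Str.split? (PySem.Str.strip (PySem.List.pyGetD lines j "")) ", ").getD []).filter
        (fun e => PySem.Str.isIn ":" e)

-- ===== PRECONDITION & SPEC =====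
def Spec_extract_san_py (lines : List String) (out : List String) : Prop := out = extract_san_py_alt lines
instance (lines : List String) (out : List String) : Decidable (Spec_extract_san_py lines out) := by unfold Spec_extract_san_py; infer_instance

-- ===== CLAIM (what is proved, stated in full; the proofs are below) =====
def Claim_equal_extract_san_py : Prop := ∀ (lines : List String), Dom_extract_san_py lines → Spec_extract_san_py lines (extract_san_py lines)

-- ===== LEMMAS AND PROOFS =====

-- parse helper (abbreviation used only in the proofs)
def pvParse (l : String) : List String :=
  ((PySem.Str.split? (PySem.Str.strip l) ", ").getD []).filter (fun e => PySem.Str.isIn ":" e)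

-- reference recursion: second phase (first non-marker DNS:/IP: line)
def extractSanScan : List String → List String
  | [] => []
  | l :: ls =>
    if pvHasMarker l then extractSanScan ls
    else if pvIsEntry l then pvParse l
    else extractSanScan ls

-- reference recursion: first phase (skip to the first marker line)
def extractSanFind : List String → List String
  | [] => []
  | l :: ls =>
    if pvHasMarker l then extractSanScan ls
    else extractSanFind ls

-- ---- A-side: A's loop equals the reference recursion ----

theorem extractSanGoA_true (ls : List String) (san : List String) :
    extractSanGoA ls san true = san ++ extractSanScan ls := by
  induction ls generalizing san with
  | nil => simp [extractSanGoA, extractSanScan]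
  | cons l ls ih =>
    simp only [extractSanGoA, extractSanScan, pvHasMarker, pvIsEntry, pvParse]
    split_ifs with h1 h2
    · exact ih san
    · rw [PySem.List.foldl_append_if_eq_filter]
    · exact ih san

theorem extractSanGoA_false (ls : List String) :
    extractSanGoA ls [] false = extractSanFind ls := by
  induction ls with
  | nil => rfl
  | cons l ls ih =>
    simp only [extractSanGoA, extractSanFind, pvHasMarker]
    by_cases h1 : PySem.Str.isIn "X509v3 Subject Alternative Name:" l = true
    · simp only [if_pos h1]
      simpa only [List.nil_append] using extractSanGoA_true ls []
    · simp only [if_neg h1, Bool.false_eq_true, if_false]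
      exact ih

-- ---- B-side: the index pipeline equals the reference recursion ----

-- head of a filtered index range = findIdx? on the dropped suffix
theorem head_filter_pyRange (L : List String) (q : String → Bool) (a : Nat) :
    (((PySem.List.pyRange (a : Int) (L.length : Int) 1).filter
        (fun i => q (PySem.List.pyGetD L i ""))).head?)
      = ((L.drop a).findIdx? q).map (fun k => ((a + k : Nat) : Int)) := by
  induction hn : L.length - a generalizing a with
  | zero =>
    have ha : L.length ≤ a := by omega
    rw [PySem.List.pyRange_one_eq_nil (by exact_mod_cast ha)]
    rw [List.drop_eq_nil_of_le ha]
    simp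
  | succ n ih =>
    have ha : a < L.length := by omega
    rw [PySem.List.pyRange_one_cons (by exact_mod_cast ha)]
    rw [← List.getElem_cons_drop ha]
    rw [List.filter_cons, List.findIdx?_cons]
    simp only [PySem.List.pyGetD_natCast, List.getD_eq_getElem?_getD,
      List.getElem?_eq_getElem ha, Option.getD_some]
    by_cases hq : q L[a] = true
    · simp [hq]
    · simp only [hq, Bool.false_eq_true, if_false, Option.map_map]
      have hcast : ((a : Int) + 1) = ((a + 1 : Nat) : Int) := by push_cast; ring
      rw [hcast, ih (a + 1) (by omega)]
      cases hfi : (L.drop (a + 1)).findIdx? q with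
      | none => simp
      | some k =>
        simp only [Option.map_some, Function.comp]
        congr 1
        push_cast; ring

-- first phase in findIdx? form
theorem find_eq_findIdx (L : List String) :
    extractSanFind L =
      match L.findIdx? pvHasMarker with
      | none => []
      | some h => extractSanScan (L.drop (h + 1)) := by
  induction L with
  | nil => rfl
  | cons l ls ih =>
    rw [List.findIdx?_cons]
    by_cases hm : pvHasMarker l = true
    · simp [extractSanFind, hm]
    · simp only [hm, Bool.false_eq_true, if_false]
      rw [extractSanFind, if_neg hm, ih]
      cases hfi : ls.findIdx? pvHasMarker with
      | none => simp
      | some h => simp [List.drop_succ_cons]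

-- second phase in findIdx? form
theorem scan_eq_findIdx (M : List String) :
    extractSanScan M =
      match M.findIdx? (fun l => !pvHasMarker l && pvIsEntry l) with
      | none => []
      | some k => pvParse (M.getD k "") := by
  induction M with
  | nil => rfl
  | cons l ls ih =>
    rw [List.findIdx?_cons]
    by_cases hm : pvHasMarker l = true
    · have : (!pvHasMarker l && pvIsEntry l) = false := by simp [hm]
      simp only [this, Bool.false_eq_true, if_false]
      rw [extractSanScan, if_pos hm, ih]
      cases hfi : ls.findIdx? (fun l => !pvHasMarker l && pvIsEntry l) with
      | none => simp
      | some k => simp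
    · by_cases he : pvIsEntry l = true
      · have : (!pvHasMarker l && pvIsEntry l) = true := by simp [hm, he]
        simp only [this, if_true]
        rw [extractSanScan, if_neg hm, if_pos he]
        simp
      · have : (!pvHasMarker l && pvIsEntry l) = false := by simp [hm, he]
        simp only [this, Bool.false_eq_true, if_false]
        rw [extractSanScan, if_neg hm, if_neg he, ih]
        cases hfi : ls.findIdx? (fun l => !pvHasMarker l && pvIsEntry l) with
        | none => simp
        | some k => simp

theorem alt_unfold (L : List String) :
    extract_san_py_alt L =
      (match (PySem.List.pyRange 0 (L.length : Int) 1).filter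
          (fun i => pvHasMarker (PySem.List.pyGetD L i "")) with
       | [] => []
       | h :: _ =>
         match (PySem.List.pyRange (h + 1) (L.length : Int) 1).filter
             (fun i => !pvHasMarker (PySem.List.pyGetD L i "") &&
                       pvIsEntry (PySem.List.pyGetD L i "")) with
         | [] => []
         | j :: _ => pvParse (PySem.List.pyGetD L j "")) := rfl

theorem alt_eq_find (L : List String) :
    extract_san_py_alt L = extractSanFind L := by
  rw [alt_unfold, find_eq_findIdx]
  have h1 := head_filter_pyRange L pvHasMarker 0
  simp only [Nat.cast_zero, List.drop_zero, Nat.zero_add] at h1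
  cases hf : L.findIdx? pvHasMarker with
  | none =>
    rw [hf] at h1
    simp only [Option.map_none] at h1
    rw [List.head?_eq_none_iff] at h1
    rw [h1]
  | some h0 =>
    rw [hf] at h1
    simp only [Option.map_some] at h1
    obtain ⟨tl, htl⟩ : ∃ tl, (PySem.List.pyRange 0 (L.length : Int) 1).filter
        (fun i => pvHasMarker (PySem.List.pyGetD L i "")) = ((h0 : Int)) :: tl := by
      cases hcase : (PySem.List.pyRange 0 (L.length : Int) 1).filter
          (fun i => pvHasMarker (PySem.List.pyGetD L i "")) with
      | nil => rw [hcase] at h1; simp at h1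
      | cons x xs =>
        rw [hcase] at h1
        simp only [List.head?_cons, Option.some_inj] at h1
        exact ⟨xs, by rw [h1]⟩
    rw [htl]
    show (match (PySem.List.pyRange ((h0 : Int) + 1) (L.length : Int) 1).filter
          (fun i => !pvHasMarker (PySem.List.pyGetD L i "") &&
                    pvIsEntry (PySem.List.pyGetD L i "")) with
        | [] => []
        | j :: _ => pvParse (PySem.List.pyGetD L j "")) = extractSanScan (L.drop (h0 + 1))
    have hcast : ((h0 : Int) + 1) = ((h0 + 1 : Nat) : Int) := by push_cast; ring
    rw [hcast, scan_eq_findIdx]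
    have h2 := head_filter_pyRange L (fun l => !pvHasMarker l && pvIsEntry l) (h0 + 1)
    cases hf2 : (L.drop (h0 + 1)).findIdx? (fun l => !pvHasMarker l && pvIsEntry l) with
    | none =>
      rw [hf2] at h2
      simp only [Option.map_none] at h2
      rw [List.head?_eq_none_iff] at h2
      rw [h2]
    | some k =>
      rw [hf2] at h2
      simp only [Option.map_some] at h2
      cases hcase : (PySem.List.pyRange (((h0 + 1 : Nat)) : Int) (L.length : Int) 1).filter
          (fun i => !pvHasMarker (PySem.List.pyGetD L i "") && pvIsEntry (PySem.List.pyGetD L i "")) with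
      | nil => rw [hcase] at h2; simp at h2
      | cons j js =>
        rw [hcase] at h2
        simp only [List.head?_cons, Option.some_inj] at h2
        show pvParse (PySem.List.pyGetD L j "") = pvParse ((L.drop (h0 + 1)).getD k "")
        rw [h2]
        simp only [PySem.List.pyGetD_natCast, List.getD_eq_getElem?_getD]
        rw [List.getElem?_drop]

-- ===== VERDICT (by name: the statement is the Claim_ definition above) =====
theorem extract_san_py_spec : Claim_equal_extract_san_py := by
  intro lines _
  show extract_san_py lines = extract_san_py_alt lines
  rw [alt_eq_find]
  exact extractSanGoA_false lines
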